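-- pv_equiv track=rewrite | github.com/syha6821/advent-of-code | 2019/17/2.py | remove_patterns
-- ===== SOURCE A (Python) =====
-- def remove_patterns(string,patterns):
--     for pattern in patterns:
--         if string.startswith(pattern):
--             string = string.removeprefix(pattern).strip(',')
--             return remove_patterns(string,patterns)
--         elif string.endswith(pattern):
--             string = string.removesuffix(pattern)
--             return remove_patterns(string,patterns).strip(',')
--     return string
-- ===== SOURCE B (Python) =====
-- def remove_patterns(string, patterns):
--     stripped_suffix = False
--     while True:
--         pattern = next((p for p in patterns if string.startswith(p) or string.endswith(p)), None)
--         if pattern is None: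
--             break
--         if string.startswith(pattern):
--             string = string.removeprefix(pattern).strip(',')
--         else:
--             string = string.removesuffix(pattern)
--             stripped_suffix = True
--     return string.strip(',') if stripped_suffix else string
-- ===== Notes on version B (the rewrite author's own statement) =====
-- stated objective: alternative
-- what changed: Replaces A's recursion, which applies .strip(',') once per suffix removal while unwinding, with a single iterative while-loop (first matching pattern found via next()) carrying a stripped_suffix flag and one final strip, correct because strip(',') is idempotent.
import Mathlib
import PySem

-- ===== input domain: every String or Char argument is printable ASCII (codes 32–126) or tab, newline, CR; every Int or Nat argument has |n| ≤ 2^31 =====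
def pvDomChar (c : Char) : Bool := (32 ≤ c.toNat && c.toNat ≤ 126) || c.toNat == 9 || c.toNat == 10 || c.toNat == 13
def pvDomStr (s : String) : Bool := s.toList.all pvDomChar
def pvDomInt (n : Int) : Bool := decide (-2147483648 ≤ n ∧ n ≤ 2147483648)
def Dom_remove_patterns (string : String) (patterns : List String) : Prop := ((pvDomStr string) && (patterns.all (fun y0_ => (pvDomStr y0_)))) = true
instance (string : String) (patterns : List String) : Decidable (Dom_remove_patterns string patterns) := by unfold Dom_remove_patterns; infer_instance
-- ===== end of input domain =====

-- B replaces A's recursion (with a `.strip(',')` applied at every suffix unwind) by a single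
-- iterative loop with a `stripped_suffix` flag and one final strip; objective: alternative
-- decomposition, same cost.

-- shared std-library helpers: Python's str.removeprefix / str.removesuffix
def pyRemoveprefix (s p : String) : String :=
  if PySem.Str.startswith s p then String.ofList (s.toList.drop p.toList.length) else s
def pyRemovesuffix (s p : String) : String :=
  if PySem.Str.endswith s p then String.ofList (s.toList.take (s.toList.length - p.toList.length)) else s

-- ===== PORT A =====
-- A's for-loop: first pattern matching as prefix (new string, strip applied inline, recurse
-- plainly) or as suffix (new string, recurse then strip).  `false` tags the prefix branch.
def pvScanA (s : String) : List String → Option (Bool × String)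
  | [] => none
  | p :: ps =>
    if PySem.Str.startswith s p then some (false, PySem.Str.stripChars (pyRemoveprefix s p) ",")
    else if PySem.Str.endswith s p then some (true, pyRemovesuffix s p)
    else pvScanA s ps

-- A's recursion, totalized with fuel (each productive step shortens the string when no
-- pattern is empty, so |string| + 1 steps suffice; with fuel exhausted Python A diverges,
-- which Pre_ excludes).
def remove_patterns_go : Nat → String → List String → String
  | 0, s, _ => s
  | fuel + 1, s, ps =>
    match pvScanA s ps with
    | none => s
    | some (false, s') => remove_patterns_go fuel s' ps
    | some (true, s') => PySem.Str.stripChars (remove_patterns_go fuel s' ps) ","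

def remove_patterns (string : String) (patterns : List String) : String :=
  remove_patterns_go (string.toList.length + 1) string patterns

-- ===== PORT B =====
-- B's `next(...)` over the generator: first pattern matching at either end.
def pvFindB (s : String) (ps : List String) : Option String :=
  ps.find? (fun p => PySem.Str.startswith s p || PySem.Str.endswith s p)

-- B's while-loop: tail recursion carrying the stripped_suffix flag; on exit, one final
-- strip iff the flag is set.  Same fuel totalization as A's port.
def remove_patterns_alt_go : Nat → String → List String → Bool → String
  | 0, s, _, flag => if flag then PySem.Str.stripChars s "," else s
  | fuel + 1, s, ps, flag =>
    match pvFindB s ps with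
    | none => if flag then PySem.Str.stripChars s "," else s
    | some p =>
      if PySem.Str.startswith s p then
        remove_patterns_alt_go fuel (PySem.Str.stripChars (pyRemoveprefix s p) ",") ps flag
      else
        remove_patterns_alt_go fuel (pyRemovesuffix s p) ps true

def remove_patterns_alt (string : String) (patterns : List String) : String :=
  remove_patterns_alt_go (string.toList.length + 1) string patterns false

-- ===== PRECONDITION & SPEC =====
-- Pre_ excludes an empty-string pattern: there Python A recurses forever (RecursionError),
-- since "".startswith matches every string and the string eventually stops changing.
def Pre_remove_patterns (string : String) (patterns : List String) : Prop :=
  "" ∉ patterns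
instance (string : String) (patterns : List String) : Decidable (Pre_remove_patterns string patterns) := by
  unfold Pre_remove_patterns; infer_instance

def pvWitness_remove_patterns : String × List String := ("ab,,c,de", ["ab", "de", "x"])

def Spec_remove_patterns (string : String) (patterns : List String) (out : String) : Prop := out = remove_patterns_alt string patterns
instance (string : String) (patterns : List String) (out : String) : Decidable (Spec_remove_patterns string patterns out) := by unfold Spec_remove_patterns; infer_instance

-- ===== CLAIM (what is proved, stated in full; the proofs are below) =====
def Claim_equal_remove_patterns : Prop := ∀ (string : String) (patterns : List String), Dom_remove_patterns string patterns → Pre_remove_patterns string patterns → Spec_remove_patterns string patterns (remove_patterns string patterns)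

-- ===== LEMMAS AND PROOFS =====

-- dropWhile is idempotent
theorem pv_dropWhile_idem {α : Type} (p : α → Bool) (l : List α) :
    List.dropWhile p (List.dropWhile p l) = List.dropWhile p l := by
  induction l with
  | nil => simp
  | cons c t ih =>
    by_cases h : p c = true
    · simpa [h] using ih
    · simp [h]

-- the first element a dropWhile leaves fails p
theorem pv_head_dropWhile {α : Type} (p : α → Bool) (a : List α) (x : α) (t : List α)
    (h : List.dropWhile p a = x :: t) : p x = false := by
  have w : List.dropWhile p a ≠ [] := by simp [h]
  have hh := List.head_dropWhile_not p w
  have hx : (List.dropWhile p a).head w = x := by simp [h]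
  rwa [hx] at hh

-- a prefix of a dropWhile result is untouched by dropWhile
theorem pv_dropWhile_prefix_of_drop {α : Type} (p : α → Bool) (a l : List α)
    (hpre : l <+: List.dropWhile p a) : List.dropWhile p l = l := by
  cases l with
  | nil => simp
  | cons x t =>
    obtain ⟨r, hr⟩ := hpre
    have hx : p x = false := pv_head_dropWhile p a x (t ++ r) (by rw [← hr]; simp)
    simp [hx]

-- strip (dropWhile at both ends) is idempotent, for any predicate
theorem pv_stripP_idem {α : Type} (p : α → Bool) (cs : List α) :
    (List.dropWhile p (List.dropWhile p
        ((List.dropWhile p (List.dropWhile p cs).reverse).reverse)).reverse).reverse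
      = (List.dropWhile p (List.dropWhile p cs).reverse).reverse := by
  set a := List.dropWhile p cs with ha
  set b := List.dropWhile p a.reverse with hb
  have hsuf : b <:+ a.reverse := hb ▸ List.dropWhile_suffix p
  have hpref : b.reverse <+: a := by
    have := List.reverse_prefix.mpr hsuf
    simpa using this
  have h1 : List.dropWhile p b.reverse = b.reverse :=
    pv_dropWhile_prefix_of_drop p cs b.reverse (ha ▸ hpref)
  rw [h1, List.reverse_reverse, hb, pv_dropWhile_idem]

-- stripping ',' is idempotent
theorem pv_strip_idem (s : String) :
    PySem.Str.stripChars (PySem.Str.stripChars s ",") "," = PySem.Str.stripChars s "," := by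
  simp only [PySem.Str.stripChars, PySem.Chars.stripChars, String.toList_ofList]
  exact congrArg String.ofList (pv_stripP_idem _ s.toList)

-- A's scan equals B's find?-then-branch step
theorem pv_scan_eq (s : String) (ps : List String) :
    pvScanA s ps = (pvFindB s ps).map (fun p =>
      if PySem.Str.startswith s p then (false, PySem.Str.stripChars (pyRemoveprefix s p) ",")
      else (true, pyRemovesuffix s p)) := by
  induction ps with
  | nil => rfl
  | cons p ps ih =>
    by_cases h1 : PySem.Chars.startswith s.toList p.toList = true
    · simp [pvScanA, pvFindB, List.find?, h1]
    · by_cases h2 : PySem.Chars.endswith s.toList p.toList = true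
      · simp [pvScanA, pvFindB, List.find?, h1, h2]
      · simpa [pvScanA, pvFindB, List.find?, h1, h2] using ih

-- raising the flag is the same as stripping the final result
theorem pv_flag_strip (fuel : Nat) (s : String) (ps : List String) :
    remove_patterns_alt_go fuel s ps true =
      PySem.Str.stripChars (remove_patterns_alt_go fuel s ps false) "," := by
  induction fuel generalizing s with
  | zero => rfl
  | succ fuel ih =>
    simp only [remove_patterns_alt_go]
    cases h : pvFindB s ps with
    | none => simp
    | some p =>
      by_cases h1 : PySem.Chars.startswith s.toList p.toList = true
      · simp only [PySem.Str.startswith_eq, if_pos h1]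
        exact ih _
      · simp only [PySem.Str.startswith_eq, if_neg h1]
        rw [ih, pv_strip_idem]

-- the two fueled loops agree (for every fuel)
theorem pv_go_eq (fuel : Nat) (s : String) (ps : List String) :
    remove_patterns_go fuel s ps = remove_patterns_alt_go fuel s ps false := by
  induction fuel generalizing s with
  | zero => rfl
  | succ fuel ih =>
    simp only [remove_patterns_go, remove_patterns_alt_go, pv_scan_eq]
    cases h : pvFindB s ps with
    | none => rfl
    | some p =>
      by_cases h1 : PySem.Chars.startswith s.toList p.toList = true
      · simp only [PySem.Str.startswith_eq, Option.map_some, if_pos h1]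
        exact ih _
      · simp only [PySem.Str.startswith_eq, Option.map_some, if_neg h1]
        rw [ih, pv_flag_strip]

-- ===== VERDICT (by name: the statement is the Claim_ definition above) =====
theorem remove_patterns_spec : Claim_equal_remove_patterns := by
  intro s ps _ _
  unfold Spec_remove_patterns remove_patterns remove_patterns_alt
  exact pv_go_eq _ s ps
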